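-- pv_equiv track=rewrite | github.com/florenciarouco/tallerDeGit | diccionarios.py | ranking_ventas
-- ===== SOURCE A (Python) =====
-- from typing import List
--
-- def ranking_ventas(productos: List[str], ventas_diarias: dict) -> dict:
--     diccionario = dict()
--
--     for producto in productos:
--         diccionario[producto] = [0] *len(productos)
--
--     for venta in ventas_diarias.values():
--         for i in range(len(venta)):
--             diccionario [venta[i]] [i] += 1
--     return diccionario
-- ===== SOURCE B (Python) =====
-- def ranking_ventas(productos, ventas_diarias):
--     ventas = list(ventas_diarias.values())
--     return {
--         p: [sum(1 for v in ventas if i < len(v) and v[i] == p)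
--             for i in range(len(productos))]
--         for p in productos
--     }
-- ===== Notes on version B (the rewrite author's own statement) =====
-- stated objective: simpler
-- what changed: B is output-driven: it builds each product's row by directly counting, for every position, the sales rows that name that product there (a pure dict/list comprehension with no mutation), instead of A's incremental writes into a pre-zeroed product-by-position matrix.
import Mathlib
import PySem

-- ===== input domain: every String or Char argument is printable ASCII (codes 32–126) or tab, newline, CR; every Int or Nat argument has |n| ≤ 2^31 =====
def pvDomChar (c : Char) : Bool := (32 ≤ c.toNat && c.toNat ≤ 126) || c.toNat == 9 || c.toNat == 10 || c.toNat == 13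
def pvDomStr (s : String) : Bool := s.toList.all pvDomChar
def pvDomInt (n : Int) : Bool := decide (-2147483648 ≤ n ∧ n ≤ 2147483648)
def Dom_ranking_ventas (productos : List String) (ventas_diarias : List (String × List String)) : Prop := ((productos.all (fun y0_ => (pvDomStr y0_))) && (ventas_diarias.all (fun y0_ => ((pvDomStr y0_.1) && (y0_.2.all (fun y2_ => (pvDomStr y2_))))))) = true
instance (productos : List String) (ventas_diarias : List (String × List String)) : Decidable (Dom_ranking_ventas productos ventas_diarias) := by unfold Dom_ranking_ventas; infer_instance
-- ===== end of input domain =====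

-- B is output-driven: it builds each product's row by counting, per position, the sales rows
-- naming that product there, instead of A's in-place increments into a pre-zeroed matrix
-- (objective: simpler). The 'ventas_diarias' dict argument is modelled as its association list;
-- both ports read its values through PySem.Dict.ofList (Python dict semantics).

-- ===== PORT A =====
def ranking_ventas (productos : List String) (ventas_diarias : List (String × List String)) : List (String × List Int) :=
  -- diccionario = dict(); for producto in productos: diccionario[producto] = [0]*len(productos)
  let d0 : PySem.Dict String (List Int) :=
    productos.foldl (fun d p => d.insert p (List.replicate productos.length (0 : Int))) PySem.Dict.empty
  -- for venta in ventas_diarias.values(): for i in range(len(venta)): diccionario[venta[i]][i] += 1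
  -- venta[i] with i < len(venta) is exact as getD; the KeyError/IndexError cases (missing key /
  -- i ≥ row length, where Python raises) are excluded by Pre_ranking_ventas.
  let dF := ((PySem.Dict.ofList ventas_diarias).values).foldl
    (fun d venta => (List.range venta.length).foldl
      (fun d i => d.modify (venta.getD i "") [] (fun row => row.set i (row.getD i 0 + 1))) d) d0
  dF.items

-- ===== PORT B =====
def ranking_ventas_alt (productos : List String) (ventas_diarias : List (String × List String)) : List (String × List Int) :=
  -- ventas = list(ventas_diarias.values())
  let ventas := (PySem.Dict.ofList ventas_diarias).values
  -- {p: [sum(1 for v in ventas if i < len(v) and v[i] == p) for i in range(len(productos))]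
  --  for p in productos}  — the guard i < len(v) makes v[i] exact as getD
  (productos.foldl
    (fun d p => d.insert p
      ((List.range productos.length).map (fun i =>
        ventas.foldl (fun acc v =>
          if i < v.length then (if v.getD i "" = p then acc + 1 else acc) else acc) (0 : Int))))
    PySem.Dict.empty).items

-- ===== PRECONDITION & SPEC =====
-- Pre_: every sale row of the dict is no longer than productos and mentions only listed products;
-- outside this A raises (KeyError / IndexError), so nothing is excluded on which A returns.
def Pre_ranking_ventas (productos : List String) (ventas_diarias : List (String × List String)) : Prop :=
  ∀ v ∈ (PySem.Dict.ofList ventas_diarias).values,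
    v.length ≤ productos.length ∧ ∀ s ∈ v, s ∈ productos
instance (productos : List String) (ventas_diarias : List (String × List String)) : Decidable (Pre_ranking_ventas productos ventas_diarias) := by unfold Pre_ranking_ventas; infer_instance
def pvWitness_ranking_ventas : List String × (List (String × List String)) :=
  (["a", "b"], [("d1", ["b", "a"]), ("d2", ["a"])])

def Spec_ranking_ventas (productos : List String) (ventas_diarias : List (String × List String)) (out : List (String × List Int)) : Prop := out = ranking_ventas_alt productos ventas_diarias
instance (productos : List String) (ventas_diarias : List (String × List String)) (out : List (String × List Int)) : Decidable (Spec_ranking_ventas productos ventas_diarias out) := by unfold Spec_ranking_ventas; infer_instance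

-- ===== CLAIM (what is proved, stated in full; the proofs are below) =====
def Claim_equal_ranking_ventas : Prop := ∀ (productos : List String) (ventas_diarias : List (String × List String)), Dom_ranking_ventas productos ventas_diarias → Pre_ranking_ventas productos ventas_diarias → Spec_ranking_ventas productos ventas_diarias (ranking_ventas productos ventas_diarias)

-- ===== LEMMAS AND PROOFS =====

-- A's nested loops are the fold of their step over the occurrence list
theorem pv_nested_foldl {δ : Type} (L : List (List String)) (step : δ → (Nat × String) → δ) (d : δ) :
    L.foldl (fun d v => (List.range v.length).foldl (fun d i => step d (i, v.getD i "")) d) d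
      = (L.flatMap (fun v => (List.range v.length).map (fun i => (i, v.getD i "")))).foldl step d := by
  induction L generalizing d with
  | nil => rfl
  | cons v L ih =>
    simp only [List.foldl_cons, List.flatMap_cons, List.foldl_append, List.foldl_map]
    exact ih _

-- getD through a loop of inserts whose value depends only on the key
theorem pv_getD_insert_loop {ν : Type} (ps : List String) (g : String → ν)
    (d : PySem.Dict String ν) (p : String) (dflt : ν) :
    (ps.foldl (fun d q => d.insert q (g q)) d).getD p dflt
      = if p ∈ ps then g p else d.getD p dflt := by
  induction ps generalizing d with
  | nil => simp
  | cons q ps ih =>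
    simp only [List.foldl_cons, ih, PySem.Dict.getD_insert, List.mem_cons]
    by_cases h1 : p ∈ ps <;> by_cases h2 : p = q <;> simp [h1, h2]

-- getD through A's increment loop: only the steps keyed at p touch the row at p
theorem pv_getD_modify_loop (os : List (Nat × String)) (d : PySem.Dict String (List Int)) (p : String) :
    (os.foldl (fun d ip => d.modify ip.2 [] (fun row => row.set ip.1 (row.getD ip.1 0 + 1))) d).getD p []
      = os.foldl (fun row ip => if p = ip.2 then row.set ip.1 (row.getD ip.1 0 + 1) else row) (d.getD p []) := by
  induction os generalizing d with
  | nil => rfl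
  | cons ip os ih =>
    simp only [List.foldl_cons, ih, PySem.Dict.getD_modify]
    by_cases hp : p = ip.2 <;> simp [hp]

-- A's per-row increment loop, characterised: length is kept, entry j gains count (j, p)
theorem pv_incr_core (p : String) (os : List (Nat × String)) (v : List Int) :
    (os.foldl (fun row ip => if p = ip.2 then row.set ip.1 (row.getD ip.1 0 + 1) else row) v).length = v.length
    ∧ ∀ j, j < v.length →
      (os.foldl (fun row ip => if p = ip.2 then row.set ip.1 (row.getD ip.1 0 + 1) else row) v).getD j 0
        = v.getD j 0 + (os.count (j, p) : Int) := by
  induction os generalizing v with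
  | nil => simp
  | cons ip os ih =>
    simp only [List.foldl_cons]
    by_cases hp : p = ip.2
    · simp only [if_pos hp]
      obtain ⟨ih1, ih2⟩ := ih (v.set ip.1 (v.getD ip.1 0 + 1))
      refine ⟨by simpa using ih1, fun j hj => ?_⟩
      rw [ih2 j (by simpa using hj)]
      by_cases hij : ip.1 = j
      · have hset : (v.set ip.1 (v.getD ip.1 0 + 1)).getD j 0 = v.getD j 0 + 1 := by
          subst hij
          simp [List.getD_eq_getElem?_getD, List.getElem?_set_self', List.getElem?_eq_getElem hj]
        have hcnt : (ip :: os).count (j, p) = os.count (j, p) + 1 := by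
          have : ip = (j, p) := by
            cases ip; cases hij; cases hp; rfl
          simp [this]
        rw [hset, hcnt]; push_cast; ring
      · have hset : (v.set ip.1 (v.getD ip.1 0 + 1)).getD j 0 = v.getD j 0 := by
          simp [List.getD_eq_getElem?_getD, List.getElem?_set_ne hij]
        have hcnt : (ip :: os).count (j, p) = os.count (j, p) := by
          have : ip ≠ (j, p) := by
            intro h; exact hij (by rw [h])
          simp [this]
        rw [hset, hcnt]
    · simp only [if_neg hp]
      obtain ⟨ih1, ih2⟩ := ih v
      refine ⟨ih1, fun j hj => ?_⟩
      rw [ih2 j hj]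
      have : ip ≠ (j, p) := by
        intro h; exact hp (by rw [h])
      simp [this]

-- Set.update by elements already present is the identity
theorem pv_update_of_subset (s : PySem.Set String) (l : List String) (h : ∀ x ∈ l, x ∈ s) :
    PySem.Set.update s l = s := by
  rw [PySem.Set.update_eq_append_filter]
  have : (PySem.Set.ofList l).filter (fun y => !(PySem.Set.contains s y)) = [] := by
    rw [List.filter_eq_nil_iff]
    intro y hy
    have hys : y ∈ s := h y ((PySem.Set.mem_ofList l y).mp hy)
    simpa using hys
  rw [this, List.append_nil]

-- every occurrence's product is a member of its row
theorem pv_mem_occs (vals : List (List String)) (ip : Nat × String)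
    (h : ip ∈ vals.flatMap (fun v => (List.range v.length).map (fun i => (i, v.getD i "")))) :
    ∃ v ∈ vals, ip.2 ∈ v := by
  obtain ⟨v, hv, hip⟩ := List.mem_flatMap.mp h
  obtain ⟨i, hi, rfl⟩ := List.mem_map.mp hip
  have hi' : i < v.length := List.mem_range.mp hi
  refine ⟨v, hv, ?_⟩
  have : v.getD i "" = v[i] := by
    simp [List.getD_eq_getElem?_getD, List.getElem?_eq_getElem hi']
  rw [this]
  exact List.getElem_mem hi'

-- one row's occurrence list contains (j, p) exactly once iff position j of the row is p
theorem pv_row_count (j : Nat) (p : String) (v : List String) :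
    ∀ n : Nat, ((List.range n).map (fun i => (i, v.getD i ""))).count (j, p)
      = if j < n ∧ v.getD j "" = p then 1 else 0 := by
  intro n
  induction n with
  | zero => simp
  | succ n ih =>
    rw [List.range_succ, List.map_append, List.count_append, ih,
        List.map_cons, List.map_nil, List.count_cons]
    simp only [List.count_nil, beq_iff_eq]
    by_cases hjn : j = n
    · subst hjn
      by_cases hv : v.getD j "" = p
      · rw [if_neg (fun h => Nat.lt_irrefl j h.1),
            if_pos (show ((j : Nat), v.getD j "") = ((j : Nat), p) by rw [hv]),
            if_pos (show j < j + 1 ∧ v.getD j "" = p from ⟨Nat.lt_succ_self j, hv⟩)]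
      · rw [if_neg (fun h => Nat.lt_irrefl j h.1),
            if_neg (show ¬((j : Nat), v.getD j "") = ((j : Nat), p) from
              fun h => hv (congrArg Prod.snd h)),
            if_neg (show ¬(j < j + 1 ∧ v.getD j "" = p) from fun h => hv h.2)]
    · have hc13 : (j < n + 1 ∧ v.getD j "" = p) ↔ (j < n ∧ v.getD j "" = p) := by
        constructor <;> rintro ⟨h, hp⟩ <;> exact ⟨by omega, hp⟩
      rw [if_neg (show ¬((n : Nat), v.getD n "") = ((j : Nat), p) from
            fun h => hjn (congrArg Prod.fst h).symm)]
      simp only [hc13, Nat.add_zero]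

-- B's column-counting fold equals the count of (j, p) in the full occurrence list
theorem pv_col_foldl (j : Nat) (p : String) (vals : List (List String)) :
    ∀ a : Int,
      vals.foldl (fun acc v =>
          if j < v.length then (if v.getD j "" = p then acc + 1 else acc) else acc) a
        = a + ((vals.flatMap (fun v => (List.range v.length).map (fun i => (i, v.getD i "")))).count (j, p) : Int) := by
  intro a
  induction vals generalizing a with
  | nil => simp
  | cons v vals ih =>
    simp only [List.foldl_cons, List.flatMap_cons, List.count_append]
    have hrow := pv_row_count j p v v.length
    by_cases h1 : j < v.length
    · by_cases h2 : v.getD j "" = p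
      · rw [if_pos h1, if_pos h2, ih, hrow, if_pos ⟨h1, h2⟩]; push_cast; ring
      · rw [if_pos h1, if_neg h2, ih, hrow, if_neg (fun h => h2 h.2)]; push_cast; ring
    · rw [if_neg h1, ih, hrow, if_neg (fun h => h1 h.1)]; push_cast; ring

-- the heart of the claim, over the list of sale rows
theorem pv_main (productos : List String) (vals : List (List String))
    (hpre : ∀ v ∈ vals, ∀ s ∈ v, s ∈ productos) :
    (vals.foldl
        (fun d venta => (List.range venta.length).foldl
          (fun d i => d.modify (venta.getD i "") [] (fun row => row.set i (row.getD i 0 + 1))) d)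
        (productos.foldl (fun d p => d.insert p (List.replicate productos.length (0 : Int))) PySem.Dict.empty)).items
      = (productos.foldl
          (fun d p => d.insert p
            ((List.range productos.length).map (fun i =>
              vals.foldl (fun acc v =>
                if i < v.length then (if v.getD i "" = p then acc + 1 else acc) else acc) (0 : Int))))
          PySem.Dict.empty).items := by
  rw [show (fun (d : PySem.Dict String (List Int)) (venta : List String) =>
        (List.range venta.length).foldl
          (fun d i => d.modify (venta.getD i "") [] (fun row => row.set i (row.getD i 0 + 1))) d)
      = (fun d venta => (List.range venta.length).foldl
          (fun d i => (fun (d : PySem.Dict String (List Int)) (ip : Nat × String) =>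
            d.modify ip.2 [] (fun row => row.set ip.1 (row.getD ip.1 0 + 1))) d (i, venta.getD i "")) d)
      from rfl]
  rw [pv_nested_foldl vals (fun (d : PySem.Dict String (List Int)) (ip : Nat × String) => d.modify ip.2 [] (fun row => row.set ip.1 (row.getD ip.1 0 + 1)))]
  set os := vals.flatMap (fun v => (List.range v.length).map (fun i => (i, v.getD i ""))) with hos
  set d0 := productos.foldl (fun d p => d.insert p (List.replicate productos.length (0 : Int))) PySem.Dict.empty with hd0
  set rowB := fun p => (List.range productos.length).map (fun i =>
      vals.foldl (fun acc v =>
        if i < v.length then (if v.getD i "" = p then acc + 1 else acc) else acc) (0 : Int)) with hrowB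
  have hd0keys : d0.keys = PySem.Set.ofList productos := by
    rw [hd0, PySem.Dict.keys_foldl_insert]
    simp [PySem.Set.update_nil_left]
  have hsndmem : ∀ ip : Nat × String, ip ∈ os → ip.2 ∈ productos := by
    intro ip hip
    obtain ⟨v, hv, hmem⟩ := pv_mem_occs vals ip (by rw [← hos]; exact hip)
    exact hpre v hv _ hmem
  have hkA : (os.foldl (fun d ip => d.modify ip.2 [] (fun row => row.set ip.1 (row.getD ip.1 0 + 1))) d0).keys
      = PySem.Set.ofList productos := by
    rw [PySem.Dict.keys_foldl_modify_key]
    rw [hd0keys, pv_update_of_subset _ _ (by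
      intro x hx
      obtain ⟨ip, hip, rfl⟩ := List.mem_map.mp hx
      exact (PySem.Set.mem_ofList _ _).mpr (hsndmem ip hip))]
  have hkB : (productos.foldl (fun d p => d.insert p (rowB p)) PySem.Dict.empty).keys
      = PySem.Set.ofList productos := by
    rw [PySem.Dict.keys_foldl_insert]
    simp [PySem.Set.update_nil_left]
  rw [PySem.Dict.items_eq_map_keys _ (by rw [hkA]; exact PySem.Set.nodup_ofList _) ([] : List Int),
      PySem.Dict.items_eq_map_keys _ (by rw [hkB]; exact PySem.Set.nodup_ofList _) ([] : List Int),
      hkA, hkB]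
  apply List.map_congr_left
  intro p hp
  have hpmem : p ∈ productos := (PySem.Set.mem_ofList _ _).mp hp
  congr 1
  rw [pv_getD_modify_loop, pv_getD_insert_loop productos rowB PySem.Dict.empty p ([] : List Int), hd0]
  simp only [pv_getD_insert_loop, if_pos hpmem]
  obtain ⟨hlenA, hgetA⟩ := pv_incr_core p os (List.replicate productos.length (0 : Int))
  apply List.ext_getElem
  · rw [hlenA, hrowB]; simp
  · intro j h1 h2
    have hj : j < productos.length := by
      have := hlenA ▸ h1
      simpa using this
    have e1 := hgetA j (by simpa using hj)
    rw [List.getD_eq_getElem?_getD, List.getElem?_eq_getElem h1] at e1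
    rw [List.getD_eq_getElem?_getD,
        List.getElem?_eq_getElem (by simpa using hj : j < (List.replicate productos.length (0 : Int)).length)] at e1
    simp only [Option.getD_some, List.getElem_replicate] at e1
    rw [e1]
    simp only [hrowB, List.getElem_map, List.getElem_range]
    exact (pv_col_foldl j p vals 0).symm

-- ===== VERDICT (by name: the statement is the Claim_ definition above) =====
theorem ranking_ventas_spec : Claim_equal_ranking_ventas := by
  intro productos vd _hdom hpre
  unfold Spec_ranking_ventas ranking_ventas ranking_ventas_alt
  simp only []
  exact pv_main productos ((PySem.Dict.ofList vd).values) (fun v hv => (hpre v hv).2)
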